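-- pv_equiv track=rewrite | github.com/openxjarvis/clawdbot-python | openclaw/channels/discord/policy.py | allowlist_includes
-- ===== SOURCE A (Python) =====
-- _ID_PREFIXES = ("discord:", "user:", "pk:", "role:", "channel:")
--
-- def _strip_prefix(value: str) -> str:
--     for pfx in _ID_PREFIXES:
--         if value.startswith(pfx):
--             return value[len(pfx):]
--     return value
--
-- def _matches_entry(entry: str, discord_id: str, name: str | None, allow_name: bool) -> bool:
--     """Check if a single allowlist entry matches the given discord_id or name."""
--     if entry == "*":
--         return True
--     bare = _strip_prefix(entry)
--     if bare == discord_id: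
--         return True
--     if allow_name and name and bare.lower() == name.lower():
--         return True
--     return False
--
-- def allowlist_includes(
--     entries: list[str],
--     discord_id: str,
--     name: str | None = None,
--     allow_name: bool = False,
-- ) -> bool:
--     """Return True if any entry in `entries` matches."""
--     if not entries:
--         return False
--     return any(_matches_entry(e, discord_id, name, allow_name) for e in entries)
-- ===== SOURCE B (Python) =====
-- _ID_PREFIXES = ("discord:", "user:", "pk:", "role:", "channel:")
--
-- def _bare(value):
--     for pfx in _ID_PREFIXES:
--         if value.startswith(pfx):
--             return value[len(pfx):]
--     return value
--
-- def allowlist_includes(entries, discord_id, name=None, allow_name=False):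
--     if "*" in entries:
--         return True
--     bare = [_bare(e) for e in entries]
--     if discord_id in bare:
--         return True
--     if allow_name and name:
--         return name.lower() in {b.lower() for b in bare}
--     return False
-- ===== Notes on version B (the rewrite author's own statement) =====
-- stated objective: alternative
-- what changed: B precomputes the prefix-stripped table once and answers with three whole-collection membership tests (wildcard on the raw entries, id on the stripped list, lowercased name against a set of lowercased stripped values) instead of A's single fused per-entry predicate.
import Mathlib
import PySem

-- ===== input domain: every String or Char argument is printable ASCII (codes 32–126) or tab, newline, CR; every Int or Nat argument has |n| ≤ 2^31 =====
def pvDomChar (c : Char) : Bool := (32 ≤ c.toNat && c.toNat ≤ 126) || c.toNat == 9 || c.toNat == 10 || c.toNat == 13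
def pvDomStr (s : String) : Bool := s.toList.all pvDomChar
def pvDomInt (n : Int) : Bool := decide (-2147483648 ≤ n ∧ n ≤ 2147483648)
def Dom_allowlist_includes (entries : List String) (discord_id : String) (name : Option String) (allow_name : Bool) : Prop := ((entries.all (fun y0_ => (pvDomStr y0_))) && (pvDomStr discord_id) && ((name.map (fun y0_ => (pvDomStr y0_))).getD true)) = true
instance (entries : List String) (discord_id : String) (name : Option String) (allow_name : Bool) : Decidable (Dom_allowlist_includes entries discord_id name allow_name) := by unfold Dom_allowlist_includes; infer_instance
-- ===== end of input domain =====

-- ===== PORT A =====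
def pvIdPrefixes : List String := ["discord:", "user:", "pk:", "role:", "channel:"]

def pvStripGo (value : String) : List String → String
  | [] => value
  | pfx :: rest =>
      if PySem.Str.startswith value pfx then PySem.Str.slice value (some (PySem.Str.len pfx)) none
      else pvStripGo value rest

def pvStripPrefix (value : String) : String := pvStripGo value pvIdPrefixes

def pvMatchesEntry (entry : String) (discord_id : String) (name : Option String) (allow_name : Bool) : Bool :=
  if entry == "*" then true
  else
    let bare := pvStripPrefix entry
    if bare == discord_id then true
    else
      match name with
      | some s =>
          if allow_name && !(s == "") && (PySem.Str.lower bare == PySem.Str.lower s) then true else false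
      | none => false

def allowlist_includes (entries : List String) (discord_id : String) (name : Option String) (allow_name : Bool) : Bool :=
  match entries with
  | [] => false  -- 'if not entries: return False'
  | _ => entries.any (fun e => pvMatchesEntry e discord_id name allow_name)

-- ===== PORT B =====
-- B: build the stripped table once, then three collection-wide membership tests
def allowlist_includes_alt (entries : List String) (discord_id : String) (name : Option String) (allow_name : Bool) : Bool :=
  if entries.contains "*" then true
  else
    let bare := entries.map pvStripPrefix
    if bare.contains discord_id then true
    else
      match name with
      | some s =>
          if allow_name && !(s == "") then
            PySem.Set.contains (PySem.Set.ofList (bare.map PySem.Str.lower)) (PySem.Str.lower s)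
          else false
      | none => false

-- ===== PRECONDITION & SPEC =====
def Spec_allowlist_includes (entries : List String) (discord_id : String) (name : Option String) (allow_name : Bool) (out : Bool) : Prop := out = allowlist_includes_alt entries discord_id name allow_name
instance (entries : List String) (discord_id : String) (name : Option String) (allow_name : Bool) (out : Bool) : Decidable (Spec_allowlist_includes entries discord_id name allow_name out) := by unfold Spec_allowlist_includes; infer_instance

-- ===== CLAIM (what is proved, stated in full; the proofs are below) =====
def Claim_equal_allowlist_includes : Prop := ∀ (entries : List String) (discord_id : String) (name : Option String) (allow_name : Bool), Dom_allowlist_includes entries discord_id name allow_name → Spec_allowlist_includes entries discord_id name allow_name (allowlist_includes entries discord_id name allow_name)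

-- ===== LEMMAS AND PROOFS =====

-- ===== VERDICT (by name: the statement is the Claim_ definition above) =====
lemma pvSetContains_ofList {xs : List String} {x : String} :
    PySem.Set.contains (PySem.Set.ofList xs) x = xs.contains x := by
  simp only [PySem.Set.contains_eq_listContains]
  rw [Bool.eq_iff_iff]
  simp [PySem.Set.mem_ofList]

lemma pvMatches_iff (e discord_id : String) (name : Option String) (allow_name : Bool) :
    pvMatchesEntry e discord_id name allow_name = true ↔
      (e = "*" ∨ pvStripPrefix e = discord_id ∨
        (allow_name = true ∧ ∃ s, name = some s ∧ s ≠ "" ∧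
          PySem.Str.lower (pvStripPrefix e) = PySem.Str.lower s)) := by
  unfold pvMatchesEntry
  cases name <;> split_ifs <;> simp_all <;> tauto

lemma pvA_iff (entries : List String) (discord_id : String) (name : Option String) (allow_name : Bool) :
    allowlist_includes entries discord_id name allow_name = true ↔
      ∃ e ∈ entries, (e = "*" ∨ pvStripPrefix e = discord_id ∨
        (allow_name = true ∧ ∃ s, name = some s ∧ s ≠ "" ∧
          PySem.Str.lower (pvStripPrefix e) = PySem.Str.lower s)) := by
  unfold allowlist_includes
  cases entries <;> simp [List.any_eq_true, pvMatches_iff]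

lemma pvB_iff (entries : List String) (discord_id : String) (name : Option String) (allow_name : Bool) :
    allowlist_includes_alt entries discord_id name allow_name = true ↔
      ("*" ∈ entries ∨ (∃ a ∈ entries, pvStripPrefix a = discord_id) ∨
        (allow_name = true ∧ ∃ s, name = some s ∧ s ≠ "" ∧
          ∃ a ∈ entries, PySem.Str.lower (pvStripPrefix a) = PySem.Str.lower s)) := by
  unfold allowlist_includes_alt
  simp only [pvSetContains_ofList]
  cases name <;> split_ifs <;> simp_all [List.mem_map] <;> tauto

theorem allowlist_includes_spec : Claim_equal_allowlist_includes := by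
  intro entries discord_id name allow_name _
  unfold Spec_allowlist_includes
  rw [Bool.eq_iff_iff, pvA_iff, pvB_iff]
  constructor
  · rintro ⟨e, he, h | h | ⟨ha, s, hn, hs, hl⟩⟩
    · exact Or.inl (h ▸ he)
    · exact Or.inr (Or.inl ⟨e, he, h⟩)
    · exact Or.inr (Or.inr ⟨ha, s, hn, hs, e, he, hl⟩)
  · rintro (h | ⟨a, ha, he⟩ | ⟨ha, s, hn, hs, a, hm, hl⟩)
    · exact ⟨"*", h, Or.inl rfl⟩
    · exact ⟨a, ha, Or.inr (Or.inl he)⟩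
    · exact ⟨a, hm, Or.inr (Or.inr ⟨ha, s, hn, hs, hl⟩)⟩
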